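-- pv_equiv track=rewrite | github.com/pypi-data/pypi-mirror-301 | packages/piiip/piiip-1.0.0-py3-none-any.whl/piiip/intended_name_generator.py | swap_char_on_pos
-- ===== SOURCE A (Python) =====
-- def swap_char_on_pos(
--
--     package_name: str,
--     character_pos_to_shift: int,
--     distance: int,
-- ) -> str:
--     """
--     Given a string, a source position in that string and a distance,
--     moves the character on the source position <distance> positions to the right
--     and the character on the destination position back to the origin position
--
--     If distance is negative, the character is shifted to the left
--     If the destination position is out of bounds, the swap is not performed
--     """
--     generated_name = ""  # start with an empty string
--     for i, current_char in enumerate(package_name):  # go over every char in name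
--         if i == character_pos_to_shift:
--             if i + distance >= len(package_name) or i + distance < 0:
--                 generated_name += current_char  # cannot swap, do not perform swap
--                 continue
--             generated_name += package_name[i + distance]
--             continue  # if this is the position to be swaped, swap forward
--         if (i - distance) == character_pos_to_shift:
--             generated_name += package_name[character_pos_to_shift]
--             continue  # if this is the position the swaped char will end up, swap back
--         generated_name += current_char  # if the char is not to be swapped, just add
--     return generated_name
-- ===== SOURCE B (Python) =====
-- def swap_char_on_pos(
--     package_name: str,
--     character_pos_to_shift: int,
--     distance: int,
-- ) -> str:
--     n = len(package_name)
--     dest = character_pos_to_shift + distance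
--     if 0 <= character_pos_to_shift < n and 0 <= dest < n:
--         chars = list(package_name)
--         chars[character_pos_to_shift], chars[dest] = chars[dest], chars[character_pos_to_shift]
--         return "".join(chars)
--     return package_name
-- ===== Notes on version B (the rewrite author's own statement) =====
-- stated objective: simpler
-- what changed: B replaces A's character-by-character rebuild loop (three branch tests per position) with a single guarded two-element swap on a char list (constant work besides the copy); A's negative-source-index wraparound is stated as the intended difference D_.
-- intended difference: When character_pos_to_shift is negative but >= -len and the destination is in range, A silently reads the source char by Python negative-index wraparound and writes it at the destination (e.g. A('abc',-1,2)='acc'); B treats the out-of-range source as 'no swap' and returns the string unchanged ('abc'), which is the documented behaviour for an out-of-bounds swap. — e.g. on swap_char_on_pos("abc", -1, 2): A returns "acc", B returns "abc"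
import Mathlib
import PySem

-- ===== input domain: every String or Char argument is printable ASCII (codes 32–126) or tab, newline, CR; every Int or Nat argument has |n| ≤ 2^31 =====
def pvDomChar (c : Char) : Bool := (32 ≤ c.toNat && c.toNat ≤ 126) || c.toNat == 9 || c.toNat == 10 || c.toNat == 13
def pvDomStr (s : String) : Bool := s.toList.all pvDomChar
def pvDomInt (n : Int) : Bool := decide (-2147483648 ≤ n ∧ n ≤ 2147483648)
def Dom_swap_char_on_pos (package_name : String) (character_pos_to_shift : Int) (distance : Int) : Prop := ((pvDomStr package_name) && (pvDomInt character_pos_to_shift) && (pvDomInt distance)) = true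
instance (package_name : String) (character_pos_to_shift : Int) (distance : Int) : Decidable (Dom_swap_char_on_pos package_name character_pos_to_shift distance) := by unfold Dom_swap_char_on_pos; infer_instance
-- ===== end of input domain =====

-- B swaps the two characters with one guarded two-element swap instead of A's rebuild loop;
-- A's negative-source-index wraparound is stated as the intended difference D_ below.

-- ===== PORT A =====
-- step of A's loop body: the three branches of the Python 'for i, current_char in enumerate(...)'
-- (each Python branch does 'generated_name += <one piece>'; the piece is computed here and
-- appended by the fold). pyGet? = Python indexing (negative wraps; none = IndexError, which
-- Pre_ excludes).
def swapStepA (cs : List Char) (character_pos_to_shift : Int) (distance : Int)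
    (ic : Int × Char) : List Char :=
  if ic.1 = character_pos_to_shift then
    if ic.1 + distance ≥ (cs.length : Int) ∨ ic.1 + distance < 0 then [ic.2]
    else (PySem.List.pyGet? cs (ic.1 + distance)).toList
  else if ic.1 - distance = character_pos_to_shift then
    (PySem.List.pyGet? cs character_pos_to_shift).toList
  else [ic.2]

def swap_char_on_pos (package_name : String) (character_pos_to_shift : Int) (distance : Int) : String :=
  let cs := package_name.toList
  let generated_name : List Char :=
    (PySem.List.enumerate cs 0).foldl
      (fun acc ic => acc ++ swapStepA cs character_pos_to_shift distance ic) []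
  String.ofList generated_name

-- ===== PORT B =====
def swap_char_on_pos_alt (package_name : String) (character_pos_to_shift : Int) (distance : Int) : String :=
  let cs := package_name.toList
  let n : Int := cs.length
  let dest : Int := character_pos_to_shift + distance
  if 0 ≤ character_pos_to_shift ∧ character_pos_to_shift < n ∧ 0 ≤ dest ∧ dest < n then
    -- chars[p], chars[dest] = chars[dest], chars[p]
    String.ofList ((cs.set character_pos_to_shift.toNat (cs.getD dest.toNat ' ')).set
      dest.toNat (cs.getD character_pos_to_shift.toNat ' '))
  else package_name

-- ===== PRECONDITION & SPEC =====
-- Pre_ excludes exactly the inputs on which A raises IndexError (source position past either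
-- end of the string while the destination position is in range).
def Pre_swap_char_on_pos (package_name : String) (character_pos_to_shift : Int) (distance : Int) : Prop :=
  ¬ ((character_pos_to_shift ≥ (package_name.toList.length : Int) ∨
      character_pos_to_shift < -(package_name.toList.length : Int)) ∧
     0 ≤ character_pos_to_shift + distance ∧
     character_pos_to_shift + distance < (package_name.toList.length : Int))
instance (package_name : String) (character_pos_to_shift : Int) (distance : Int) : Decidable (Pre_swap_char_on_pos package_name character_pos_to_shift distance) := by unfold Pre_swap_char_on_pos; infer_instance

def pvWitness_swap_char_on_pos : String × Int × Int := ("abcd", 1, 2)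

-- On a negative source position ≥ -len with the destination in range (and the two characters
-- actually different), A silently reads the source by Python negative-index wraparound and
-- writes that char at the destination (A "abc" (-1) 2 = "acc"); B treats the out-of-range
-- source as "no swap" and returns the string unchanged ("abc"), the documented behaviour for
-- an out-of-bounds swap.
def D_swap_char_on_pos (package_name : String) (character_pos_to_shift : Int) (distance : Int) : Prop :=
  -(package_name.toList.length : Int) ≤ character_pos_to_shift ∧
  character_pos_to_shift < 0 ∧
  0 ≤ character_pos_to_shift + distance ∧
  character_pos_to_shift + distance < (package_name.toList.length : Int) ∧
  package_name.toList[(character_pos_to_shift + distance).toNat]? ≠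
    package_name.toList[(character_pos_to_shift + (package_name.toList.length : Int)).toNat]?
instance (package_name : String) (character_pos_to_shift : Int) (distance : Int) : Decidable (D_swap_char_on_pos package_name character_pos_to_shift distance) := by unfold D_swap_char_on_pos; infer_instance

def Spec_swap_char_on_pos (package_name : String) (character_pos_to_shift : Int) (distance : Int) (out : String) : Prop := ¬ D_swap_char_on_pos package_name character_pos_to_shift distance → out = swap_char_on_pos_alt package_name character_pos_to_shift distance
instance (package_name : String) (character_pos_to_shift : Int) (distance : Int) (out : String) : Decidable (Spec_swap_char_on_pos package_name character_pos_to_shift distance out) := by unfold Spec_swap_char_on_pos; infer_instance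

def pvDiffWitness_swap_char_on_pos : String × Int × Int := ("abc", -1, 2)
def pvDiffWitnessOut_swap_char_on_pos : String × String := ("acc", "abc")

-- ===== CLAIM (what is proved, stated in full; the proofs are below) =====
def Claim_unchanged_swap_char_on_pos : Prop := ∀ (package_name : String) (character_pos_to_shift : Int) (distance : Int), Dom_swap_char_on_pos package_name character_pos_to_shift distance → Pre_swap_char_on_pos package_name character_pos_to_shift distance → Spec_swap_char_on_pos package_name character_pos_to_shift distance (swap_char_on_pos package_name character_pos_to_shift distance)
def Claim_changed_swap_char_on_pos : Prop := Dom_swap_char_on_pos (pvDiffWitness_swap_char_on_pos.1) (pvDiffWitness_swap_char_on_pos.2.1) (pvDiffWitness_swap_char_on_pos.2.2) ∧ Pre_swap_char_on_pos (pvDiffWitness_swap_char_on_pos.1) (pvDiffWitness_swap_char_on_pos.2.1) (pvDiffWitness_swap_char_on_pos.2.2) ∧ D_swap_char_on_pos (pvDiffWitness_swap_char_on_pos.1) (pvDiffWitness_swap_char_on_pos.2.1) (pvDiffWitness_swap_char_on_pos.2.2) ∧ swap_char_on_pos (pvDiffWitness_swap_char_on_pos.1) (pvDiffWitness_swap_char_on_pos.2.1)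 (pvDiffWitness_swap_char_on_pos.2.2) = pvDiffWitnessOut_swap_char_on_pos.1 ∧ swap_char_on_pos_alt (pvDiffWitness_swap_char_on_pos.1) (pvDiffWitness_swap_char_on_pos.2.1) (pvDiffWitness_swap_char_on_pos.2.2) = pvDiffWitnessOut_swap_char_on_pos.2 ∧ pvDiffWitnessOut_swap_char_on_pos.1 ≠ pvDiffWitnessOut_swap_char_on_pos.2
def Claim_exact_swap_char_on_pos : Prop := ∀ (package_name : String) (character_pos_to_shift : Int) (distance : Int), Dom_swap_char_on_pos package_name character_pos_to_shift distance → Pre_swap_char_on_pos package_name character_pos_to_shift distance → D_swap_char_on_pos package_name character_pos_to_shift distance → swap_char_on_pos package_name character_pos_to_shift distance ≠ swap_char_on_pos_alt package_name character_pos_to_shift distance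
-- ===== LEMMAS AND PROOFS =====

-- A's generated_name is the flatMap of the step over the enumeration.
theorem genA_eq_flatMap (cs : List Char) (p d : Int) :
    (PySem.List.enumerate cs 0).foldl
      (fun acc ic => acc ++ swapStepA cs p d ic) [] =
    (PySem.List.enumerate cs 0).flatMap (swapStepA cs p d) := by
  simpa using PySem.List.foldl_append_eq_flatMap (swapStepA cs p d) (PySem.List.enumerate cs 0) []

theorem flatMap_eq_map_of_mem {α β : Type} {l : List α} {g : α → List β} {h : α → β}
    (H : ∀ x ∈ l, g x = [h x]) : l.flatMap g = l.map h := by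
  induction l with
  | nil => rfl
  | cons a t ih =>
    simp only [List.flatMap_cons, List.map_cons]
    rw [H a (List.mem_cons_self ..), ih (fun x hx => H x (List.mem_cons_of_mem _ hx))]
    rfl

-- membership form of enumerate elements
theorem enum_elt {α : Type} {cs : List α} {x : Int × α} (hx : x ∈ PySem.List.enumerate cs 0) :
    ∃ (k : Nat) (h : k < cs.length), x = ((k : Int), cs[k]) := by
  rcases (PySem.List.mem_enumerate_iff _ _ _).1 hx with ⟨k, hk, rfl⟩
  exact ⟨k, hk, by simp⟩

theorem swap_char_on_pos_spec : Claim_unchanged_swap_char_on_pos := by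
  intro s p d _ hpre hnd
  unfold Pre_swap_char_on_pos at hpre
  unfold D_swap_char_on_pos at hnd
  unfold swap_char_on_pos swap_char_on_pos_alt
  simp only [genA_eq_flatMap]
  set cs := s.toList with hcs
  by_cases hc : 0 ≤ p ∧ p < (cs.length : Int) ∧ 0 ≤ p + d ∧ p + d < (cs.length : Int)
  · -- real swap: both positions in range
    obtain ⟨hp0, hpn, hq0, hqn⟩ := hc
    rw [if_pos ⟨hp0, hpn, hq0, hqn⟩]
    have hmap : (PySem.List.enumerate cs 0).flatMap (swapStepA cs p d) =
        (PySem.List.enumerate cs 0).map (fun ic =>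
          if ic.1 = p then cs.getD (p + d).toNat ' '
          else if ic.1 - d = p then cs.getD p.toNat ' ' else ic.2) := by
      apply flatMap_eq_map_of_mem
      intro x hx
      rcases enum_elt hx with ⟨k, hk, rfl⟩
      simp only [swapStepA]
      by_cases h1 : (k : Int) = p
      · rw [if_pos h1, if_pos h1, if_neg (by omega)]
        rw [PySem.List.pyGet?_eq_some_getElem cs (by omega) (by omega)]
        simp [h1, List.getElem?_eq_getElem (show (p+d).toNat < cs.length by omega)]
      · rw [if_neg h1, if_neg h1]
        by_cases h2 : (k : Int) - d = p
        · rw [if_pos h2, if_pos h2]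
          rw [PySem.List.pyGet?_eq_some_getElem cs (by omega) (by omega)]
          simp [List.getElem?_eq_getElem (show p.toNat < cs.length by omega)]
        · rw [if_neg h2, if_neg h2]
    rw [hmap]
    congr 1
    apply List.ext_getElem
    · simp
    · intro j hj1 hj2
      have hjlen : j < cs.length := by simpa using hj2
      rw [List.getElem_map, PySem.List.getElem_enumerate]
      simp only [zero_add]
      rw [List.getElem_set, List.getElem_set]
      split_ifs <;> first
        | rfl
        | omega
        | (congr 1; omega)
  · -- no swap performed: every step keeps its own character
    rw [if_neg hc]
    have hmap : (PySem.List.enumerate cs 0).flatMap (swapStepA cs p d) =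
        (PySem.List.enumerate cs 0).map (fun ic => ic.2) := by
      apply flatMap_eq_map_of_mem
      intro x hx
      rcases enum_elt hx with ⟨k, hk, rfl⟩
      simp only [swapStepA]
      by_cases h1 : (k : Int) = p
      · -- p in range but destination out of bounds: branch keeps the char
        have hout : (k:Int) + d ≥ (cs.length : Int) ∨ (k:Int) + d < 0 := by
          by_contra ho
          exact hc ⟨by omega, by omega, by omega, by omega⟩
        rw [if_pos h1, if_pos hout]
      · rw [if_neg h1]
        by_cases h2 : (k : Int) - d = p
        · -- destination k in range; Pre forces -len ≤ p < len, hc then forces p < 0;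
          -- ¬D forces the back-filled char to equal the one already there
          rw [if_pos h2]
          have hd0 : (0:Int) ≤ p + d := by omega
          have hdn : p + d < (cs.length : Int) := by omega
          have hrange : -(cs.length : Int) ≤ p ∧ p < (cs.length : Int) := by
            by_contra hco
            exact hpre ⟨by omega, hd0, hdn⟩
          have hpneg : p < 0 := by
            by_contra hpp
            exact hc ⟨by omega, hrange.2, hd0, hdn⟩
          have heq : cs[(p + d).toNat]? = cs[(p + (cs.length : Int)).toNat]? := by
            by_contra hne
            exact hnd ⟨hrange.1, hpneg, hd0, hdn, hne⟩
          have hknp : (p + d).toNat = k := by omega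
          have hnp : (p + (cs.length : Int)).toNat < cs.length := by omega
          have hget : PySem.List.pyGet? cs p = cs[(p + (cs.length : Int)).toNat]? := by
            have h0 := PySem.List.pyGet?_neg_natCast cs ((-p).toNat) (by omega) (by omega)
            have e1 : -(((-p).toNat : Nat) : Int) = p := by omega
            have e2 : cs.length - (-p).toNat = (p + (cs.length : Int)).toNat := by omega
            rw [e1, e2] at h0
            exact h0
          rw [hget, ← heq, hknp]
          simp [List.getElem?_eq_getElem hk]
        · rw [if_neg h2]
    rw [hmap, PySem.List.map_snd_enumerate]
    simp [hcs]

theorem swap_char_on_pos_changed : Claim_changed_swap_char_on_pos := by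
  unfold Claim_changed_swap_char_on_pos; decide

theorem swap_char_on_pos_tight : Claim_exact_swap_char_on_pos := by
  intro s p d _ _ hD
  unfold D_swap_char_on_pos at hD
  obtain ⟨h1, h2, h3, h4, h5⟩ := hD
  unfold swap_char_on_pos swap_char_on_pos_alt
  simp only [genA_eq_flatMap]
  set cs := s.toList with hcs
  rw [if_neg (show ¬(0 ≤ p ∧ p < (cs.length : Int) ∧ 0 ≤ p + d ∧ p + d < (cs.length : Int)) by omega)]
  have hmap : (PySem.List.enumerate cs 0).flatMap (swapStepA cs p d) =
      (PySem.List.enumerate cs 0).map (fun ic =>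
        if ic.1 - d = p then cs.getD (p + (cs.length : Int)).toNat ' ' else ic.2) := by
    apply flatMap_eq_map_of_mem
    intro x hx
    rcases enum_elt hx with ⟨k, hk, rfl⟩
    simp only [swapStepA]
    rw [if_neg (show ¬((k : Int) = p) by omega)]
    by_cases h6 : (k : Int) - d = p
    · rw [if_pos h6, if_pos h6]
      have h0 := PySem.List.pyGet?_neg_natCast cs ((-p).toNat) (by omega) (by omega)
      have e1 : -(((-p).toNat : Nat) : Int) = p := by omega
      have e2 : cs.length - (-p).toNat = (p + (cs.length : Int)).toNat := by omega
      rw [e1, e2] at h0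
      rw [h0]
      simp [List.getElem?_eq_getElem (show (p + (cs.length : Int)).toNat < cs.length by omega)]
    · rw [if_neg h6, if_neg h6]
  rw [hmap]
  intro hEq
  have hlist : ((PySem.List.enumerate cs 0).map (fun ic =>
      if ic.1 - d = p then cs.getD (p + (cs.length : Int)).toNat ' ' else ic.2)) = cs := by
    have := congrArg String.toList hEq
    simpa [hcs] using this
  have hj : (p + d).toNat < cs.length := by omega
  have := congrArg (fun l => l[(p + d).toNat]?) hlist
  simp only [List.getElem?_map, PySem.List.getElem?_enumerate,
    List.getElem?_eq_getElem hj, Option.map_some] at this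
  rw [if_pos (show (0 : Int) + ((p + d).toNat : Int) - d = p by omega)] at this
  have hval : cs.getD (p + (cs.length : Int)).toNat ' ' = cs[(p + d).toNat] := Option.some.inj this
  apply h5
  rw [List.getElem?_eq_getElem hj,
      List.getElem?_eq_getElem (show (p + (cs.length : Int)).toNat < cs.length by omega),
      ← hval, List.getD_eq_getElem _ _ (show (p + (cs.length : Int)).toNat < cs.length by omega)]
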